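-- pv_equiv track=rewrite | github.com/shenuwu/osu-lan-tracking | mod_validator.py | normalize_mods
-- ===== SOURCE A (Python) =====
-- IGNORED_MODS = {"SD", "PF", "MR"}
--
-- def normalize_mods(mods: str) -> set:
--     """Zet mod string om naar een set. Normaliseert NC naar DT, negeert presentatie-mods."""
--     if not mods or mods == "NM":
--         return set()
--     known = {"SV2", "CL", "NF", "HD", "HR", "DT", "NC", "EZ", "HT", "FL", "SD", "PF", "RX", "AP", "SO", "MR"}
--     result = set()
--     i = 0
--     while i < len(mods):
--         chunk = mods[i:i+2].upper()
--         if chunk in known: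
--             if chunk == "NC":
--                 result.add("DT")
--             elif chunk not in IGNORED_MODS:
--                 result.add(chunk)
--             i += 2
--         else:
--             i += 1
--     return result
-- ===== SOURCE B (Python) =====
-- import re
--
-- IGNORED_MODS = {"SD", "PF", "MR"}
--
-- # 2-char mod tokens (the known set minus "SV2", which a 2-char window can never match)
-- _PAT = re.compile("CL|NF|HD|HR|DT|NC|EZ|HT|FL|SD|PF|RX|AP|SO|MR", re.IGNORECASE)
--
-- def normalize_mods(mods: str) -> set:
--     result = set()
--     for m in _PAT.findall(mods):
--         u = m.upper()
--         if u == "NC":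
--             result.add("DT")
--         elif u not in IGNORED_MODS:
--             result.add(u)
--     return result
-- ===== Notes on version B (the rewrite author's own statement) =====
-- stated objective: idiomatic
-- what changed: A's manual index loop with interleaved classification is replaced by a compiled case-insensitive regex alternation of the 2-char tokens (re.findall) followed by a separate normalization pass over the matches; the early-return special cases for '' and 'NM' are dropped since the scan already yields an empty set there.
import Mathlib
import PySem

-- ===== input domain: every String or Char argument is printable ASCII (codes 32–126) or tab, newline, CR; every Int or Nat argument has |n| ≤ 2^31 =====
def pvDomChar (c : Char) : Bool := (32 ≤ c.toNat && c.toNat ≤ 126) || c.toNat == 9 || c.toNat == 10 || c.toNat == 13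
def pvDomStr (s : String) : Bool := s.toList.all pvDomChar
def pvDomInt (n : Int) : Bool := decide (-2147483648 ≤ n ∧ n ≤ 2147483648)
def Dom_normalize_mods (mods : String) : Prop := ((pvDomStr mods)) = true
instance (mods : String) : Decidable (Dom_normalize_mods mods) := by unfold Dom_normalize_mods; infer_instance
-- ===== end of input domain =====

-- B replaces A's manual window/branch loop by a regex-findall scan plus a separate
-- normalization pass over the matches (objective: idiomatic; same O(n) cost).

-- ===== PORT A =====
-- Python set literals as lists of distinct elements (chunks on the List Char side).
def pvIgnoredL : List (List Char) := [['S','D'], ['P','F'], ['M','R']]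
def pvKnownL : List (List Char) :=
  [['S','V','2'], ['C','L'], ['N','F'], ['H','D'], ['H','R'], ['D','T'], ['N','C'],
   ['E','Z'], ['H','T'], ['F','L'], ['S','D'], ['P','F'], ['R','X'], ['A','P'],
   ['S','O'], ['M','R']]

-- A's inner classification of a matched known chunk (the if/elif body of the loop)
def pvAddA (chunk : List Char) (result : PySem.Set (List Char)) : PySem.Set (List Char) :=
  if chunk = ['N','C'] then PySem.Set.add result ['D','T']
  else if pvIgnoredL.contains chunk then result
  else PySem.Set.add result chunk

-- the while loop: state = remaining suffix of the string (mods[i:]);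
-- chunk = take 2 of it; i += 2 ↦ drop 2, i += 1 ↦ tail (split on suffix length for structural recursion)
def pvLoopA : List Char → PySem.Set (List Char) → PySem.Set (List Char)
  | [], result => result
  | [c], result =>
    let chunk := PySem.Chars.upper [c]
    if pvKnownL.contains chunk then pvLoopA [] (pvAddA chunk result)
    else pvLoopA [] result
  | c :: d :: rest, result =>
    let chunk := PySem.Chars.upper [c, d]
    if pvKnownL.contains chunk then pvLoopA rest (pvAddA chunk result)
    else pvLoopA (d :: rest) result

def normalize_mods (mods : String) : List String :=
  if mods = "" ∨ mods = "NM" then []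
  else (pvLoopA mods.toList PySem.Set.empty).map String.ofList

-- ===== PORT B =====
-- the 2-char tokens of the regex alternation (the known set minus "SV2")
def pvTokensL : List (List Char) :=
  [['C','L'], ['N','F'], ['H','D'], ['H','R'], ['D','T'], ['N','C'],
   ['E','Z'], ['H','T'], ['F','L'], ['S','D'], ['P','F'], ['R','X'], ['A','P'],
   ['S','O'], ['M','R']]

-- re.findall: at each position try the case-insensitive fixed-length-2 alternation;
-- on a match emit the raw matched text and advance past it, else advance one char
def pvFindAll : List Char → List (List Char)
  | [] => []
  | [_] => []
  | c :: d :: rest =>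
    if pvTokensL.contains (PySem.Chars.upper [c, d]) then [c, d] :: pvFindAll rest
    else pvFindAll (d :: rest)

-- the normalization pass over the matches
def pvStep (result : PySem.Set (List Char)) (m : List Char) : PySem.Set (List Char) :=
  let u := PySem.Chars.upper m
  if u = ['N','C'] then PySem.Set.add result ['D','T']
  else if pvIgnoredL.contains u then result
  else PySem.Set.add result u

def normalize_mods_alt (mods : String) : List String :=
  ((pvFindAll mods.toList).foldl pvStep PySem.Set.empty).map String.ofList

-- ===== PRECONDITION & SPEC =====
def Spec_normalize_mods (mods : String) (out : List String) : Prop := out = normalize_mods_alt mods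
instance (mods : String) (out : List String) : Decidable (Spec_normalize_mods mods out) := by unfold Spec_normalize_mods; infer_instance

-- ===== CLAIM (what is proved, stated in full; the proofs are below) =====
def Claim_equal_normalize_mods : Prop := ∀ (mods : String), Dom_normalize_mods mods → Spec_normalize_mods mods (normalize_mods mods)

-- ===== LEMMAS AND PROOFS =====

-- A 2-char (or shorter) chunk is never "SV2", so membership in A's known set
-- coincides with membership in B's token set.
lemma known_eq_tokens (l : List Char) (h : l.length ≤ 2) :
    pvKnownL.contains l = pvTokensL.contains l := by
  simp [pvKnownL, pvTokensL]
  intro heq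
  subst heq
  simp at h

lemma loopA_eq_foldl : ∀ (cs : List Char) (result : PySem.Set (List Char)),
    pvLoopA cs result = (pvFindAll cs).foldl pvStep result := by
  intro cs
  induction cs using pvFindAll.induct with
  | case1 => intro result; rfl
  | case2 c =>
    intro result
    rw [pvLoopA, pvFindAll]
    rw [known_eq_tokens _ (by simp [PySem.Chars.upper])]
    split
    · next htok => exfalso; revert htok; simp [pvTokensL, PySem.Chars.upper]
    · rfl
  | case3 c d rest htok ih =>
    intro result
    rw [pvLoopA, pvFindAll]
    rw [known_eq_tokens _ (by simp [PySem.Chars.upper])]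
    simp only [htok, if_true, List.foldl_cons]
    rw [ih]
    rfl
  | case4 c d rest htok ih =>
    intro result
    rw [pvLoopA, pvFindAll]
    rw [known_eq_tokens _ (by simp [PySem.Chars.upper])]
    simp only [Bool.not_eq_true] at htok
    simp only [htok]
    exact ih result

-- ===== VERDICT (by name: the statement is the Claim_ definition above) =====
theorem normalize_mods_spec : Claim_equal_normalize_mods := by
  intro mods _
  unfold Spec_normalize_mods normalize_mods normalize_mods_alt
  by_cases h : mods = "" ∨ mods = "NM"
  · rcases h with h | h <;> subst h <;> simp <;> decide
  · rw [if_neg h, loopA_eq_foldl]
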